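-- pv_equiv track=rewrite | github.com/limits220284/CP | leetcode/1420.生成数组.py | numOfArrays1
-- ===== SOURCE A (Python) =====
-- def numOfArrays1(n: int, m: int, k: int) -> int:
--     if k == 0: return 0
--     f = [[[0] * (k + 1) for _ in range(m + 1)] for _ in range(n + 1)]
--     for i in range(1, m + 1):
--         f[1][i][1] = 1
--     for i in range(2, n + 1):
--         for j in range(1, m + 1):
--             for t in range(1, min(k, i) + 1):
--                 f[i][j][t] += f[i - 1][j][t] * j
--                 for j0 in range(1, j):
--                     f[i][j][t] += f[i - 1][j0][t - 1]
--     ans = sum(f[n][j][k] for j in range(1, m + 1)) % (10 ** 9 + 7)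
--     return ans
-- ===== SOURCE B (Python) =====
-- def numOfArrays1(n: int, m: int, k: int) -> int:
--     # k maxima-updates need k strictly increasing prefix maxima, impossible beyond length n
--     if k <= 0 or m <= 0 or n <= 0 or k > n:
--         return 0
--     # dp[j][t]: arrays of current length with maximum exactly j and t cost updates
--     dp = [[0] * (k + 1) for _ in range(m + 1)]
--     for j in range(1, m + 1):
--         dp[j][1] = 1
--     for i in range(2, n + 1):
--         c = min(k, i)
--         new = [[0] * (k + 1) for _ in range(m + 1)]
--         prefix = [0] * (c + 1)  # prefix[t] = sum of dp[j0][t] for j0 processed so far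
--         for j in range(1, m + 1):
--             for t in range(1, c + 1):
--                 new[j][t] = dp[j][t] * j + prefix[t - 1]
--             for t in range(0, c + 1):
--                 prefix[t] = prefix[t] + dp[j][t]
--         dp = new
--     return sum(dp[j][k] for j in range(1, m + 1)) % (10 ** 9 + 7)
-- ===== Notes on version B (the rewrite author's own statement) =====
-- stated objective: faster
-- what changed: B replaces the O(m) inner j0-rescan of A's 3D DP by a running prefix-sum array over the previous row and keeps only two rolling 2D layers instead of the full 3D table, eliminating one factor of m.
import Mathlib
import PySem

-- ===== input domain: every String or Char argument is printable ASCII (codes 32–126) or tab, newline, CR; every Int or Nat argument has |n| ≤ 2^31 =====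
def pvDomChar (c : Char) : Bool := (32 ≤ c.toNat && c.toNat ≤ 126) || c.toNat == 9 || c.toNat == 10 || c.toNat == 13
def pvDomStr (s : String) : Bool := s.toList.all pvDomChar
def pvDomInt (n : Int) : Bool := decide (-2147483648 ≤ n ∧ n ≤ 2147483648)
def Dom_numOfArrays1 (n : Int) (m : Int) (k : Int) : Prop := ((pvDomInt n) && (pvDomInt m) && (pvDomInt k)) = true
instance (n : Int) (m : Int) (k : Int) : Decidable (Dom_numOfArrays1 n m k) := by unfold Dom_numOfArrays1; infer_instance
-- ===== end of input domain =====

-- B replaces A's inner j0-rescan by a running prefix-sum array and rolls the 3D table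
-- down to two rolling layers (objective: faster, O(n*m*k) instead of O(n*m^2*k)).
-- Both ports model their zero-initialised Python tables as default-0 keyed tables
-- (read = getD 0, write = insert); this is exact on Pre_, where every index the
-- Python touches is nonnegative and in range.

-- ===== PORT A =====
-- Python list cells: read l[i] / write l[i] = v with a nonnegative in-range index
-- (exact on Pre_, where every index the Python touches is nonnegative and in range)
def ag (q : Array Int) (c : Int) : Int := q.getD c.toNat 0
def as1 (q : Array Int) (c v : Int) : Array Int := q.setIfInBounds c.toNat v

-- the 3D table f: read f[a][b][c], write f[a][b][c] = v
def tget (f : Array (Array (Array Int))) (a b c : Int) : Int :=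
  ag ((f.getD a.toNat #[]).getD b.toNat #[]) c
def tset (f : Array (Array (Array Int))) (a b c v : Int) : Array (Array (Array Int)) :=
  f.modify a.toNat (fun r => r.modify b.toNat (fun q => as1 q c v))

-- body of A's innermost 't' iteration: the '+=' statement, then the j0 loop of '+=' statements
def aInner (i j t : Int) (f : Array (Array (Array Int))) : Array (Array (Array Int)) :=
  let f' := tset f i j t (tget f i j t + tget f (i-1) j t * j)
  (PySem.List.pyRange 1 j 1).foldl (fun g j0 => tset g i j t (tget g i j t + tget g (i-1) j0 (t-1))) f'

-- A's 'for t in range(1, min(k, i) + 1)' loop for fixed i, j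
def aRow (k i : Int) (f : Array (Array (Array Int))) (j : Int) : Array (Array (Array Int)) :=
  (PySem.List.pyRange 1 (min k i + 1) 1).foldl (fun g t => aInner i j t g) f

-- A's 'for j in range(1, m + 1)' loop for fixed i
def aStep (m k : Int) (f : Array (Array (Array Int))) (i : Int) : Array (Array (Array Int)) :=
  (PySem.List.pyRange 1 (m+1) 1).foldl (aRow k i) f

def numOfArrays1 (n : Int) (m : Int) (k : Int) : Int :=
  if k = 0 then 0 else
  PySem.Int.mod (((PySem.List.pyRange 1 (m+1) 1).map (fun j =>
      tget ((PySem.List.pyRange 2 (n+1) 1).foldl (aStep m k)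
        ((PySem.List.pyRange 1 (m+1) 1).foldl (fun f i => tset f 1 i 1 1)
          (Array.replicate (n+1).toNat
            (Array.replicate (m+1).toNat (Array.replicate (k+1).toNat 0))))) n j k)).sum)
    (10^9+7)

-- ===== PORT B =====
-- B's 2D layers dp/new: read dp[j][t], write dp[j][t] = v
def dget (dp : Array (Array Int)) (j t : Int) : Int := ag (dp.getD j.toNat #[]) t
def dset (dp : Array (Array Int)) (j t v : Int) : Array (Array Int) :=
  dp.modify j.toNat (fun q => as1 q t v)
-- B's 1D prefix array (guarded at negative indices, which B never uses)
def pget (pr : Array Int) (t : Int) : Int := if 0 ≤ t then ag pr t else 0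
def pset (pr : Array Int) (t v : Int) : Array Int := as1 pr t v

-- B's body of 'for j in range(1, m + 1)': fill new[j][1..c], then fold dp[j] into prefix[0..c]
def bRow (k i : Int) (dp : Array (Array Int))
    (np : Array (Array Int) × Array Int) (j : Int) :
    Array (Array Int) × Array Int :=
  let nw := (PySem.List.pyRange 1 (min k i + 1) 1).foldl
    (fun nw t => dset nw j t (dget dp j t * j + pget np.2 (t-1))) np.1
  let pr := (PySem.List.pyRange 0 (min k i + 1) 1).foldl
    (fun pr t => pset pr t (pget pr t + dget dp j t)) np.2
  (nw, pr)

-- B's 'for i in range(2, n + 1)' body: fresh new/prefix, sweep j, keep new as dp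
def bStep (m k : Int) (dp : Array (Array Int)) (i : Int) : Array (Array Int) :=
  ((PySem.List.pyRange 1 (m+1) 1).foldl (bRow k i dp)
    (Array.replicate (m+1).toNat (Array.replicate (k+1).toNat 0),
     Array.replicate (min k i + 1).toNat 0)).1

def numOfArrays1_alt (n : Int) (m : Int) (k : Int) : Int :=
  if k ≤ 0 ∨ m ≤ 0 ∨ n ≤ 0 ∨ n < k then 0 else
  PySem.Int.mod (((PySem.List.pyRange 1 (m+1) 1).map (fun j =>
      dget ((PySem.List.pyRange 2 (n+1) 1).foldl (bStep m k)
        ((PySem.List.pyRange 1 (m+1) 1).foldl (fun dp j => dset dp j 1 1)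
          (Array.replicate (m+1).toNat (Array.replicate (k+1).toNat 0)))) j k)).sum)
    (10^9+7)

-- ===== PRECONDITION & SPEC =====
-- Pre_ excludes exactly the inputs where A raises IndexError: k ≠ 0 with m ≥ 1 and (n < 1 or k < 0).
def Pre_numOfArrays1 (n : Int) (m : Int) (k : Int) : Prop :=
  k = 0 ∨ m ≤ 0 ∨ (1 ≤ n ∧ 1 ≤ k)
instance (n : Int) (m : Int) (k : Int) : Decidable (Pre_numOfArrays1 n m k) := by
  unfold Pre_numOfArrays1; infer_instance
def pvWitness_numOfArrays1 : Int × Int × Int := (3, 3, 2)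

def Spec_numOfArrays1 (n : Int) (m : Int) (k : Int) (out : Int) : Prop := out = numOfArrays1_alt n m k
instance (n : Int) (m : Int) (k : Int) (out : Int) : Decidable (Spec_numOfArrays1 n m k out) := by
  unfold Spec_numOfArrays1; infer_instance

-- ===== CLAIM (what is proved, stated in full; the proofs are below) =====
def Claim_equal_numOfArrays1 : Prop := ∀ (n : Int) (m : Int) (k : Int), Dom_numOfArrays1 n m k → Pre_numOfArrays1 n m k → Spec_numOfArrays1 n m k (numOfArrays1 n m k)

-- ===== LEMMAS AND PROOFS =====

-- ---- array-cell access lemmas ----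

lemma size_as1 (q : Array Int) (c v : Int) : (as1 q c v).size = q.size :=
  Array.size_setIfInBounds ..

lemma getD_eq_get {α : Type} (a : Array α) (i : Nat) (d : α) (h : i < a.size) :
    a.getD i d = a[i] := by
  rw [Array.getD_eq_getD_getElem?, Array.getElem?_eq_getElem h]; rfl

lemma ag_as1 (q : Array Int) (c v z : Int) (hc : c.toNat < q.size) :
    ag (as1 q c v) z = if z.toNat = c.toNat then v else ag q z := by
  unfold ag as1
  rw [Array.getD_eq_getD_getElem?, Array.getElem?_setIfInBounds]
  by_cases h : z.toNat = c.toNat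
  · rw [if_pos h.symm, if_pos hc, if_pos h]; rfl
  · rw [if_neg (fun hh => h hh.symm), if_neg h, ← Array.getD_eq_getD_getElem?]

-- shape of the 3D table: N rows of M rows of K cells
def Sh3 (f : Array (Array (Array Int))) (N M K : Nat) : Prop :=
  f.size = N ∧ ∀ i : Nat, i < N →
    (f.getD i #[]).size = M ∧ ∀ j : Nat, j < M → ((f.getD i #[]).getD j #[]).size = K

lemma row_tset (f : Array (Array (Array Int))) (a b c v : Int) (y : Nat) :
    (tset f a b c v).getD y #[]
      = if y = a.toNat ∧ a.toNat < f.size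
          then (f.getD y #[]).modify b.toNat (fun q => as1 q c v)
          else f.getD y #[] := by
  unfold tset
  rw [Array.getD_eq_getD_getElem?, Array.getElem?_modify]
  by_cases h1 : a.toNat = y
  · subst h1
    by_cases h2 : a.toNat < f.size
    · rw [if_pos rfl, if_pos ⟨rfl, h2⟩, Array.getElem?_eq_getElem h2]
      simp only [Option.map_some, Option.getD_some]
      rw [getD_eq_get _ _ _ h2]
    · rw [if_pos rfl, if_neg (fun hh => h2 hh.2), Array.getElem?_eq_none (by omega)]
      simp only [Option.map_none, Option.getD_none]
      rw [Array.getD_eq_getD_getElem?, Array.getElem?_eq_none (by omega)]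
      rfl
  · rw [if_neg h1, if_neg (fun hh => h1 hh.1.symm), ← Array.getD_eq_getD_getElem?]

lemma inrow_modify (r : Array (Array Int)) (b c v : Int) (j : Nat) :
    (r.modify b.toNat (fun q => as1 q c v)).getD j #[]
      = if j = b.toNat ∧ b.toNat < r.size then as1 (r.getD j #[]) c v else r.getD j #[] := by
  rw [Array.getD_eq_getD_getElem?, Array.getElem?_modify]
  by_cases h1 : b.toNat = j
  · subst h1
    by_cases h2 : b.toNat < r.size
    · rw [if_pos rfl, if_pos ⟨rfl, h2⟩, Array.getElem?_eq_getElem h2]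
      simp only [Option.map_some, Option.getD_some]
      rw [getD_eq_get _ _ _ h2]
    · rw [if_pos rfl, if_neg (fun hh => h2 hh.2), Array.getElem?_eq_none (by omega)]
      simp only [Option.map_none, Option.getD_none]
      rw [Array.getD_eq_getD_getElem?, Array.getElem?_eq_none (by omega)]
      rfl
  · rw [if_neg h1, if_neg (fun hh => h1 hh.1.symm), ← Array.getD_eq_getD_getElem?]

lemma sh3_tset {f : Array (Array (Array Int))} {N M K : Nat} (h : Sh3 f N M K)
    (a b c v : Int) : Sh3 (tset f a b c v) N M K := by
  obtain ⟨h1, h2⟩ := h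
  refine ⟨by simp [tset, Array.size_modify, h1], ?_⟩
  intro i hi
  rw [row_tset]
  split_ifs with hcase
  · obtain ⟨hsz, hin⟩ := h2 i hi
    refine ⟨by rw [Array.size_modify]; exact hsz, ?_⟩
    intro j hj
    rw [inrow_modify]
    split_ifs with hc2
    · rw [size_as1]; exact hin j hj
    · exact hin j hj
  · exact h2 i hi

lemma tget_tset {f : Array (Array (Array Int))} {N M K : Nat} (hsh : Sh3 f N M K)
    (a b c v x y z : Int) (ha1 : 1 ≤ a) (haN : a.toNat < N) (hb1 : 1 ≤ b) (hbM : b.toNat < M)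
    (hc1 : 1 ≤ c) (hcK : c.toNat < K) :
    tget (tset f a b c v) x y z = if x = a ∧ y = b ∧ z = c then v else tget f x y z := by
  obtain ⟨h1, h2⟩ := hsh
  unfold tget
  rw [row_tset]
  by_cases hx : x.toNat = a.toNat
  · rw [if_pos ⟨hx, by omega⟩, hx]
    obtain ⟨hsz, hin⟩ := h2 a.toNat (by omega)
    rw [inrow_modify]
    by_cases hy : y.toNat = b.toNat
    · rw [if_pos ⟨hy, by omega⟩, hy]
      rw [ag_as1 _ _ _ _ (by rw [hin b.toNat (by omega)]; exact hcK)]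
      by_cases hz : z.toNat = c.toNat
      · rw [if_pos hz, if_pos ⟨by omega, by omega, by omega⟩]
      · rw [if_neg hz, if_neg (by intro hh; exact hz (by rw [hh.2.2]))]
    · rw [if_neg (fun hh => hy hh.1), if_neg (by intro hh; exact hy (by rw [hh.2.1]))]
  · rw [if_neg (fun hh => hx hh.1), if_neg (by intro hh; exact hx (by rw [hh.1]))]

lemma sh3_rep (N M K : Nat) :
    Sh3 (Array.replicate N (Array.replicate M (Array.replicate K (0:Int)))) N M K := by
  refine ⟨by simp, ?_⟩
  intro i hi
  rw [Array.getD_eq_getD_getElem?, Array.getElem?_replicate, if_pos hi]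
  simp only [Option.getD_some]
  refine ⟨by simp, ?_⟩
  intro j hj
  rw [Array.getD_eq_getD_getElem?, Array.getElem?_replicate, if_pos hj]
  simp

lemma getD_rep {α : Type} (n : Nat) (v : α) (i : Nat) (d : α) :
    (Array.replicate n v).getD i d = if i < n then v else d := by
  rw [Array.getD_eq_getD_getElem?, Array.getElem?_replicate]
  split_ifs <;> rfl

lemma getD_nil {α : Type} (i : Nat) (d : α) : (#[] : Array α).getD i d = d := by
  rw [Array.getD_eq_getD_getElem?, Array.getElem?_eq_none (by simp)]
  rfl

lemma tget_rep (N M K : Nat) (x y z : Int) :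
    tget (Array.replicate N (Array.replicate M (Array.replicate K (0:Int)))) x y z = 0 := by
  unfold tget ag
  rw [getD_rep]
  split_ifs with h1
  · rw [getD_rep]
    split_ifs with h2
    · rw [getD_rep]; split_ifs <;> rfl
    · rw [getD_nil]
  · rw [getD_nil, getD_nil]

-- the common mathematical recurrence: F i j t = number of length-i arrays with max j, cost t
def F : Nat → Int → Int → Int
  | 0, _, _ => 0
  | 1, _, t => if t = 1 then 1 else 0
  | (i+2), j, t =>
      if t ≤ 0 ∨ ((i:Int)+2) < t then 0
      else j * F (i+1) j t + ((PySem.List.pyRange 1 j 1).map (fun j0 => F (i+1) j0 (t-1))).sum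

lemma F_zero_of_nonpos (i : Nat) (j t : Int) (ht : t ≤ 0) : F i j t = 0 := by
  match i with
  | 0 => rfl
  | 1 => simp [F]; omega
  | (i+2) => simp only [F]; rw [if_pos (Or.inl ht)]

lemma F_zero_of_gt (i : Nat) (j t : Int) (ht : (i:Int) < t) : F i j t = 0 := by
  match i with
  | 0 => rfl
  | 1 => simp [F]; omega
  | (i+2) =>
    simp only [F]
    rw [if_pos]
    right; exact_mod_cast ht

lemma F_rec (N : Nat) (j t : Int) (hN : 1 ≤ N) (h1 : 1 ≤ t) (h2 : t ≤ (N:Int)+1) :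
    F (N+1) j t = j * F N j t + ((PySem.List.pyRange 1 j 1).map (fun j0 => F N j0 (t-1))).sum := by
  obtain ⟨M, rfl⟩ : ∃ M, N = M + 1 := ⟨N - 1, by omega⟩
  show F (M+2) j t = _
  simp only [F]
  rw [if_neg]
  push_cast at h2
  omega

-- ---- A side ----

-- A phase 1: the table after 'f[1][i][1] = 1' over i ∈ L
lemma phase1A (L : List Int) {N M K : Nat} (f0 : Array (Array (Array Int)))
    (hsh : Sh3 f0 N M K) (hN : 1 < N) (hK : 1 < K) (hL : ∀ i ∈ L, 1 ≤ i ∧ i.toNat < M) :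
    Sh3 (L.foldl (fun f i => tset f 1 i 1 1) f0) N M K ∧
    ∀ x y z : Int, tget (L.foldl (fun f i => tset f 1 i 1 1) f0) x y z
      = if x = 1 ∧ y ∈ L ∧ z = 1 then 1 else tget f0 x y z := by
  induction L generalizing f0 with
  | nil => exact ⟨hsh, by simp⟩
  | cons a L ih =>
    have ha := hL a List.mem_cons_self
    have hL' : ∀ i ∈ L, 1 ≤ i ∧ i.toNat < M := fun i hi => hL i (List.mem_cons_of_mem _ hi)
    obtain ⟨ihs, ihp⟩ := ih (tset f0 1 a 1 1) (sh3_tset hsh 1 a 1 1) hL'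
    refine ⟨by rw [List.foldl_cons]; exact ihs, ?_⟩
    intro x y z
    rw [List.foldl_cons, ihp x y z,
        tget_tset hsh 1 a 1 1 x y z (le_refl 1) (by omega) ha.1 ha.2 (le_refl 1) (by omega)]
    simp only [List.mem_cons]
    split_ifs <;> first | rfl | tauto

-- A's j0 loop collapses to one assignment adding a sum
lemma j0fold (L : List Int) {N M K : Nat} (f : Array (Array (Array Int))) (hsh : Sh3 f N M K)
    (i j t : Int) (hi2 : 2 ≤ i) (hiN : i.toNat < N) (hj1 : 1 ≤ j) (hjM : j.toNat < M)
    (ht1 : 1 ≤ t) (htK : t.toNat < K) :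
    Sh3 (L.foldl (fun g j0 => tset g i j t (tget g i j t + tget g (i-1) j0 (t-1))) f) N M K ∧
    ∀ x y z : Int,
    tget (L.foldl (fun g j0 => tset g i j t (tget g i j t + tget g (i-1) j0 (t-1))) f) x y z
      = if x = i ∧ y = j ∧ z = t
          then tget f i j t + (L.map (fun j0 => tget f (i-1) j0 (t-1))).sum
          else tget f x y z := by
  induction L generalizing f with
  | nil =>
    refine ⟨hsh, ?_⟩
    intro x y z
    simp only [List.foldl_nil, List.map_nil, List.sum_nil]
    split_ifs with h
    · obtain ⟨rfl, rfl, rfl⟩ := h; ring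
    · rfl
  | cons a L ih =>
    obtain ⟨ihs, ihp⟩ := ih (tset f i j t (tget f i j t + tget f (i-1) a (t-1)))
      (sh3_tset hsh i j t _)
    refine ⟨by rw [List.foldl_cons]; exact ihs, ?_⟩
    intro x y z
    have hset := tget_tset hsh i j t (tget f i j t + tget f (i-1) a (t-1))
    have hread : ∀ j0 : Int,
        tget (tset f i j t (tget f i j t + tget f (i-1) a (t-1))) (i-1) j0 (t-1)
          = tget f (i-1) j0 (t-1) := by
      intro j0
      rw [hset (i-1) j0 (t-1) (by omega) hiN hj1 hjM ht1 htK, if_neg (by intro h; omega)]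
    rw [List.foldl_cons, ihp x y z]
    by_cases h : x = i ∧ y = j ∧ z = t
    · rw [if_pos h, if_pos h]
      simp only [hread, List.map_cons, List.sum_cons]
      rw [hset i j t (by omega) hiN hj1 hjM ht1 htK, if_pos ⟨rfl, rfl, rfl⟩]
      ring
    · rw [if_neg h, if_neg h, hset x y z (by omega) hiN hj1 hjM ht1 htK, if_neg h]

-- one full t-iteration of A is a single cell write
lemma aInner_eq (i j t : Int) {N M K : Nat} (g : Array (Array (Array Int))) (hsh : Sh3 g N M K)
    (hi2 : 2 ≤ i) (hiN : i.toNat < N) (hj1 : 1 ≤ j) (hjM : j.toNat < M)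
    (ht1 : 1 ≤ t) (htK : t.toNat < K) :
    Sh3 (aInner i j t g) N M K ∧
    ∀ x y z : Int, tget (aInner i j t g) x y z
      = if x = i ∧ y = j ∧ z = t
          then tget g i j t + tget g (i-1) j t * j
            + ((PySem.List.pyRange 1 j 1).map (fun j0 => tget g (i-1) j0 (t-1))).sum
          else tget g x y z := by
  obtain ⟨js, jp⟩ := j0fold (PySem.List.pyRange 1 j 1)
    (tset g i j t (tget g i j t + tget g (i-1) j t * j)) (sh3_tset hsh i j t _)
    i j t hi2 hiN hj1 hjM ht1 htK
  refine ⟨js, ?_⟩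
  intro x y z
  have hset := tget_tset hsh i j t (tget g i j t + tget g (i-1) j t * j)
  have hread : ∀ j0 : Int,
      tget (tset g i j t (tget g i j t + tget g (i-1) j t * j)) (i-1) j0 (t-1)
        = tget g (i-1) j0 (t-1) := by
    intro j0
    rw [hset (i-1) j0 (t-1) (by omega) hiN hj1 hjM ht1 htK, if_neg (by intro h; omega)]
  show tget ((PySem.List.pyRange 1 j 1).foldl _ _) x y z = _
  rw [jp x y z]
  by_cases h : x = i ∧ y = j ∧ z = t
  · rw [if_pos h, if_pos h]
    simp only [hread]
    rw [hset i j t (by omega) hiN hj1 hjM ht1 htK, if_pos ⟨rfl, rfl, rfl⟩]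
  · rw [if_neg h, if_neg h, hset x y z (by omega) hiN hj1 hjM ht1 htK, if_neg h]

-- A's t loop: each cell (i, j, t) gets old + row(i-1) recurrence value
lemma tfoldA (T : List Int) (hT : T.Nodup) {N M K : Nat} (f : Array (Array (Array Int)))
    (hsh : Sh3 f N M K) (i j : Int) (hi2 : 2 ≤ i) (hiN : i.toNat < N)
    (hj1 : 1 ≤ j) (hjM : j.toNat < M) (hTb : ∀ t ∈ T, 1 ≤ t ∧ t.toNat < K) :
    Sh3 (T.foldl (fun g t => aInner i j t g) f) N M K ∧
    ∀ x y z : Int, tget (T.foldl (fun g t => aInner i j t g) f) x y z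
      = if x = i ∧ y = j ∧ z ∈ T then
          tget f i j z + tget f (i-1) j z * j
            + ((PySem.List.pyRange 1 j 1).map (fun j0 => tget f (i-1) j0 (z-1))).sum
        else tget f x y z := by
  induction T generalizing f with
  | nil => exact ⟨hsh, by simp⟩
  | cons a T ih =>
    obtain ⟨ha, hT'⟩ := List.nodup_cons.mp hT
    have hab := hTb a List.mem_cons_self
    obtain ⟨sInner, pInner⟩ := aInner_eq i j a f hsh hi2 hiN hj1 hjM hab.1 hab.2
    obtain ⟨ihs, ihp⟩ := ih hT' (aInner i j a f) sInner
      (fun t ht => hTb t (List.mem_cons_of_mem _ ht))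
    refine ⟨by rw [List.foldl_cons]; exact ihs, ?_⟩
    intro x y z
    have hne : ∀ b c : Int, tget (aInner i j a f) (i-1) b c = tget f (i-1) b c := by
      intro b c; rw [pInner, if_neg (by intro h; omega)]
    have hz : ∀ z : Int, z ≠ a → tget (aInner i j a f) i j z = tget f i j z := by
      intro z hza; rw [pInner, if_neg (fun h => hza h.2.2)]
    rw [List.foldl_cons, ihp x y z]
    by_cases h1 : x = i ∧ y = j ∧ z ∈ T
    · rw [if_pos h1, if_pos ⟨h1.1, h1.2.1, List.mem_cons_of_mem _ h1.2.2⟩]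
      have hza : z ≠ a := fun h => ha (h ▸ h1.2.2)
      simp only [hz z hza, hne]
    · rw [if_neg h1]
      by_cases h2 : x = i ∧ y = j ∧ z = a
      · obtain ⟨rfl, rfl, rfl⟩ := h2
        rw [if_pos ⟨rfl, rfl, List.mem_cons_self⟩, pInner,
          if_pos (⟨rfl, rfl, rfl⟩ : x = x ∧ y = y ∧ z = z)]
      · rw [if_neg (by
          intro h
          rcases List.mem_cons.mp h.2.2 with h' | h'
          · exact h2 ⟨h.1, h.2.1, h'⟩
          · exact h1 ⟨h.1, h.2.1, h'⟩), pInner, if_neg h2]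

-- the table A maintains: rows 1..I filled, cell (a,b,c) = F a b c on the filled region
def Gtab (m k I : Int) : Int → Int → Int → Int :=
  fun a b c => if 1 ≤ a ∧ a ≤ I ∧ 1 ≤ b ∧ b ≤ m ∧ 1 ≤ c ∧ c ≤ min k a then F a.toNat b c else 0

lemma Gtab_row (m k I : Int) (hI : 1 ≤ I) (b c : Int) (hb : 1 ≤ b ∧ b ≤ m) (hc : 0 ≤ c ∧ c ≤ k) :
    Gtab m k I I b c = F I.toNat b c := by
  unfold Gtab
  by_cases h : 1 ≤ c ∧ c ≤ min k I
  · rw [if_pos ⟨hI, le_refl I, hb.1, hb.2, h.1, h.2⟩]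
  · rw [if_neg (fun h3 => h ⟨h3.2.2.2.2.1, h3.2.2.2.2.2⟩)]
    by_cases h0 : c ≤ 0
    · rw [F_zero_of_nonpos _ _ _ h0]
    · have hIc : ((I.toNat : Int)) < c := by omega
      rw [F_zero_of_gt _ _ _ hIc]

-- intermediate state of A's j sweep on row I+1
def HHA (m k I J : Int) : Int → Int → Int → Int :=
  fun x y z => if x = I+1 ∧ 1 ≤ y ∧ y ≤ J ∧ 1 ≤ z ∧ z ≤ min k (I+1)
    then F (I+1).toNat y z else Gtab m k I x y z

lemma rowA_aux (m k I : Int) {N M K : Nat} (hk : 1 ≤ k) (hI : 1 ≤ I)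
    (hiN : (I+1).toNat < N) (hM : m.toNat < M) (hKk : k.toNat < K)
    (S : Array (Array (Array Int))) (hshS : Sh3 S N M K)
    (hS : ∀ x y z : Int, tget S x y z = Gtab m k I x y z) :
    ∀ J : Nat, (J:Int) ≤ m →
    Sh3 ((PySem.List.pyRange 1 ((J:Int)+1) 1).foldl (aRow k (I+1)) S) N M K ∧
    ∀ x y z : Int,
    tget ((PySem.List.pyRange 1 ((J:Int)+1) 1).foldl (aRow k (I+1)) S) x y z
      = HHA m k I (J:Int) x y z := by
  intro J
  induction J with
  | zero =>
    intro _
    rw [PySem.List.pyRange_one_eq_nil (by norm_num), List.foldl_nil]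
    refine ⟨hshS, ?_⟩
    intro x y z
    rw [hS]
    unfold HHA
    rw [if_neg (by push_cast; omega)]
  | succ J ih =>
    intro hJm
    have hJ : (J:Int) ≤ m := by push_cast at hJm ⊢; omega
    have hJm' : (J:Int)+1 ≤ m := by push_cast at hJm; omega
    obtain ⟨ihs, ihp⟩ := ih hJ
    push_cast
    rw [show ((J:Int)+1+1) = ((J:Int)+1)+1 from rfl,
        PySem.List.pyRange_one_succ_right (by omega), List.foldl_append,
        List.foldl_cons, List.foldl_nil]
    generalize hG : (PySem.List.pyRange 1 ((J:Int)+1) 1).foldl (aRow k (I+1)) S = S' at ihs ihp ⊢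
    have hTb : ∀ t ∈ PySem.List.pyRange 1 (min k (I+1) + 1) 1, 1 ≤ t ∧ t.toNat < K := by
      intro t ht
      rw [PySem.List.mem_pyRange_one] at ht
      exact ⟨by omega, by omega⟩
    obtain ⟨ts, tp⟩ := tfoldA (PySem.List.pyRange 1 (min k (I+1) + 1) 1)
      (PySem.List.nodup_pyRange_one _ _) S' ihs (I+1) ((J:Int)+1)
      (by omega) hiN (by omega) (by omega) hTb
    refine ⟨ts, ?_⟩
    intro x y z
    show tget ((PySem.List.pyRange 1 (min k (I+1) + 1) 1).foldl
        (fun g t => aInner (I+1) ((J:Int)+1) t g) S') x y z = _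
    rw [tp x y z]
    simp only [ihp]
    by_cases hmem : x = I+1 ∧ y = (J:Int)+1 ∧ z ∈ PySem.List.pyRange 1 (min k (I+1) + 1) 1
    · rw [if_pos hmem]
      obtain ⟨hx, hy, hz⟩ := hmem
      subst hx
      rw [PySem.List.mem_pyRange_one] at hz
      have r1 : HHA m k I (J:Int) (I+1) ((J:Int)+1) z = 0 := by
        unfold HHA Gtab; rw [if_neg (by omega), if_neg (by omega)]
      have r2 : HHA m k I (J:Int) I ((J:Int)+1) z = F I.toNat ((J:Int)+1) z := by
        unfold HHA; rw [if_neg (by omega)]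
        exact Gtab_row m k I hI _ _ ⟨by omega, hJm'⟩ ⟨by omega, by omega⟩
      have r3 : ∀ j0 ∈ PySem.List.pyRange 1 ((J:Int)+1) 1,
          HHA m k I (J:Int) I j0 (z-1) = F I.toNat j0 (z-1) := by
        intro j0 hj0
        rw [PySem.List.mem_pyRange_one] at hj0
        unfold HHA; rw [if_neg (by omega)]
        exact Gtab_row m k I hI _ _ ⟨by omega, by omega⟩ ⟨by omega, by omega⟩
      simp only [show I+1-1 = I by ring, hy]
      rw [r1, r2, List.map_congr_left r3]
      unfold HHA
      rw [if_pos (by omega)]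
      have ht : (I+1).toNat = I.toNat + 1 := by omega
      rw [ht, F_rec I.toNat ((J:Int)+1) z (by omega) (by omega) (by omega)]
      ring
    · rw [if_neg hmem]
      simp only [PySem.List.mem_pyRange_one] at hmem
      unfold HHA
      by_cases h2 : x = I+1 ∧ 1 ≤ y ∧ y ≤ (J:Int) ∧ 1 ≤ z ∧ z ≤ min k (I+1)
      · rw [if_pos h2, if_pos (by omega)]
      · rw [if_neg h2, if_neg (by omega)]

lemma rowA (m k I : Int) {N M K : Nat} (hk : 1 ≤ k) (hI : 1 ≤ I) (hm : 1 ≤ m)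
    (hiN : (I+1).toNat < N) (hM : m.toNat < M) (hKk : k.toNat < K)
    (S : Array (Array (Array Int))) (hshS : Sh3 S N M K)
    (hS : ∀ x y z : Int, tget S x y z = Gtab m k I x y z) :
    Sh3 ((PySem.List.pyRange 1 (m+1) 1).foldl (aRow k (I+1)) S) N M K ∧
    ∀ x y z : Int,
    tget ((PySem.List.pyRange 1 (m+1) 1).foldl (aRow k (I+1)) S) x y z
      = Gtab m k (I+1) x y z := by
  have hmt : ((m.toNat : Int)) = m := by omega
  have h := rowA_aux m k I hk hI hiN hM hKk S hshS hS m.toNat (by omega)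
  rw [hmt] at h
  obtain ⟨hs, hp⟩ := h
  refine ⟨hs, ?_⟩
  intro x y z
  rw [hp x y z]
  unfold HHA
  by_cases h1 : x = I+1 ∧ 1 ≤ y ∧ y ≤ m ∧ 1 ≤ z ∧ z ≤ min k (I+1)
  · rw [if_pos h1]
    unfold Gtab
    rw [if_pos (by omega), h1.1]
  · rw [if_neg h1]
    unfold Gtab
    by_cases h2 : 1 ≤ x ∧ x ≤ I ∧ 1 ≤ y ∧ y ≤ m ∧ 1 ≤ z ∧ z ≤ min k x
    · rw [if_pos h2, if_pos (by omega)]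
    · rw [if_neg h2, if_neg (by omega)]

lemma ifoldA (m k : Int) {N M K : Nat} (hk : 1 ≤ k) (hm : 1 ≤ m)
    (hM : m.toNat < M) (hKk : k.toNat < K)
    (S : Array (Array (Array Int))) (hshS : Sh3 S N M K)
    (hS : ∀ x y z : Int, tget S x y z = Gtab m k 1 x y z) :
    ∀ Nn : Nat, ((Nn:Int)+2) ≤ (N:Int) →
    Sh3 ((PySem.List.pyRange 2 (2+(Nn:Int)) 1).foldl (aStep m k) S) N M K ∧
    ∀ x y z : Int,
    tget ((PySem.List.pyRange 2 (2+(Nn:Int)) 1).foldl (aStep m k) S) x y z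
      = Gtab m k (1+(Nn:Int)) x y z := by
  intro Nn
  induction Nn with
  | zero =>
    intro _
    rw [PySem.List.pyRange_one_eq_nil (by norm_num), List.foldl_nil]
    refine ⟨hshS, ?_⟩
    intro x y z
    rw [hS]
    norm_num
  | succ Nn ih =>
    intro hb
    have hb' : ((Nn:Int)+2) ≤ (N:Int) := by push_cast at hb ⊢; omega
    obtain ⟨ihs, ihp⟩ := ih hb'
    push_cast
    rw [show ((2:Int)+((Nn:Int)+1)) = (2+(Nn:Int))+1 by ring,
        PySem.List.pyRange_one_succ_right (by omega), List.foldl_append,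
        List.foldl_cons, List.foldl_nil]
    generalize hG : (PySem.List.pyRange 2 (2+(Nn:Int)) 1).foldl (aStep m k) S = S' at ihs ihp ⊢
    have hrow := rowA m k (1+(Nn:Int)) (N := N) (M := M) (K := K) hk (by omega) hm
      (by push_cast at hb; omega) hM hKk S' ihs (fun x y z => ihp x y z)
    obtain ⟨rs, rp⟩ := hrow
    constructor
    · show Sh3 ((PySem.List.pyRange 1 (m+1) 1).foldl (aRow k (2+(Nn:Int))) S') N M K
      rw [show ((2:Int)+(Nn:Int)) = (1+(Nn:Int))+1 by ring]
      exact rs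
    · intro x y z
      show tget ((PySem.List.pyRange 1 (m+1) 1).foldl (aRow k (2+(Nn:Int))) S') x y z = _
      rw [show ((2:Int)+(Nn:Int)) = (1+(Nn:Int))+1 by ring, rp x y z,
          show ((1:Int)+(Nn:Int))+1 = 1+((Nn:Int)+1) by ring]

lemma A_main (n m k : Int) (hn : 1 ≤ n) (hm : 1 ≤ m) (hk : 1 ≤ k) :
    numOfArrays1 n m k
      = PySem.Int.mod (((PySem.List.pyRange 1 (m+1) 1).map (fun j => F n.toNat j k)).sum)
          (10^9+7) := by
  unfold numOfArrays1
  rw [if_neg (by omega)]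
  obtain ⟨f1s, f1p⟩ := phase1A (PySem.List.pyRange 1 (m+1) 1)
    (N := (n+1).toNat) (M := (m+1).toNat) (K := (k+1).toNat)
    (Array.replicate (n+1).toNat (Array.replicate (m+1).toNat (Array.replicate (k+1).toNat 0)))
    (sh3_rep _ _ _) (by omega) (by omega)
    (by
      intro i hi
      rw [PySem.List.mem_pyRange_one] at hi
      exact ⟨hi.1, by omega⟩)
  have hf1 : ∀ x y z : Int,
      tget ((PySem.List.pyRange 1 (m+1) 1).foldl (fun f i => tset f 1 i 1 1)
        (Array.replicate (n+1).toNat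
          (Array.replicate (m+1).toNat (Array.replicate (k+1).toNat 0)))) x y z
        = Gtab m k 1 x y z := by
    intro x y z
    rw [f1p x y z]
    unfold Gtab
    by_cases h : x = 1 ∧ y ∈ PySem.List.pyRange 1 (m+1) 1 ∧ z = 1
    · obtain ⟨rfl, hy, rfl⟩ := h
      rw [PySem.List.mem_pyRange_one] at hy
      rw [if_pos ⟨rfl, PySem.List.mem_pyRange_one.mpr hy, rfl⟩, if_pos (by omega)]
      simp [F]
    · have h' := h
      simp only [PySem.List.mem_pyRange_one] at h'
      rw [if_neg h, if_neg (by omega), tget_rep]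
  obtain ⟨f2s, f2p⟩ := ifoldA m k (N := (n+1).toNat) (M := (m+1).toNat) (K := (k+1).toNat)
    hk hm (by omega) (by omega) _ f1s hf1 (n-1).toNat (by omega)
  have hn' : ((n - 1).toNat : Int) = n - 1 := by omega
  rw [hn'] at f2p
  simp only [show (2 + (n-1)) = n + 1 by ring, show (1 + (n-1)) = n by ring] at f2p
  simp only [f2p]
  congr 1
  refine congrArg List.sum (List.map_congr_left ?_)
  intro j hj
  rw [PySem.List.mem_pyRange_one] at hj
  exact Gtab_row m k n hn j k ⟨hj.1, by omega⟩ ⟨by omega, le_refl k⟩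

-- ---- B side ----

-- shape of a 2D layer
def Sh2 (r : Array (Array Int)) (M K : Nat) : Prop :=
  r.size = M ∧ ∀ j : Nat, j < M → (r.getD j #[]).size = K

lemma sh2_dset {r : Array (Array Int)} {M K : Nat} (h : Sh2 r M K) (b c v : Int) :
    Sh2 (dset r b c v) M K := by
  obtain ⟨h1, h2⟩ := h
  refine ⟨by simp [dset, Array.size_modify, h1], ?_⟩
  intro j hj
  unfold dset
  rw [inrow_modify]
  split_ifs with hc
  · rw [size_as1]; exact h2 j hj
  · exact h2 j hj

lemma dget_dset {r : Array (Array Int)} {M K : Nat} (hsh : Sh2 r M K)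
    (b c v x y : Int) (hb1 : 1 ≤ b) (hbM : b.toNat < M) (hc1 : 1 ≤ c) (hcK : c.toNat < K) :
    dget (dset r b c v) x y = if x = b ∧ y = c then v else dget r x y := by
  obtain ⟨h1, h2⟩ := hsh
  unfold dget dset
  rw [inrow_modify]
  by_cases hx : x.toNat = b.toNat
  · rw [if_pos ⟨hx, by omega⟩, hx]
    rw [ag_as1 _ _ _ _ (by rw [h2 b.toNat (by omega)]; exact hcK)]
    by_cases hy : y.toNat = c.toNat
    · rw [if_pos hy, if_pos ⟨by omega, by omega⟩]
    · rw [if_neg hy, if_neg (by intro hh; exact hy (by rw [hh.2]))]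
  · rw [if_neg (fun hh => hx hh.1), if_neg (by intro hh; exact hx (by rw [hh.1]))]

lemma sh2_rep (M K : Nat) : Sh2 (Array.replicate M (Array.replicate K (0:Int))) M K := by
  refine ⟨by simp, ?_⟩
  intro j hj
  rw [Array.getD_eq_getD_getElem?, Array.getElem?_replicate, if_pos hj]
  simp

lemma dget_rep (M K : Nat) (x y : Int) :
    dget (Array.replicate M (Array.replicate K (0:Int))) x y = 0 := by
  unfold dget ag
  rw [getD_rep]
  split_ifs with h1
  · rw [getD_rep]; split_ifs <;> rfl
  · rw [getD_nil]

lemma size_pset (p : Array Int) (t v : Int) : (pset p t v).size = p.size := size_as1 ..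

lemma pget_pset (p : Array Int) (a v y : Int) (ha0 : 0 ≤ a) (haS : a.toNat < p.size) :
    pget (pset p a v) y = if y = a then v else pget p y := by
  unfold pget pset
  by_cases hy : 0 ≤ y
  · rw [if_pos hy, ag_as1 _ _ _ _ haS]
    by_cases h : y.toNat = a.toNat
    · rw [if_pos h, if_pos (by omega)]
    · rw [if_neg h, if_neg (by omega), if_pos hy]
  · rw [if_neg hy, if_neg (by omega), if_neg hy]

lemma pget_rep (S : Nat) (y : Int) : pget (Array.replicate S (0:Int)) y = 0 := by
  unfold pget ag
  split_ifs with h0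
  · rw [getD_rep]; split_ifs <;> rfl
  · rfl

-- the rolling layer B maintains after i steps
def DG (m k I : Int) : Int → Int → Int :=
  fun b c => if 1 ≤ b ∧ b ≤ m ∧ 1 ≤ c ∧ c ≤ min k I then F I.toNat b c else 0

lemma DG_eq_F (m k I : Int) (hI : 1 ≤ I) (b c : Int) (hb : 1 ≤ b ∧ b ≤ m) (hc : 0 ≤ c ∧ c ≤ k) :
    DG m k I b c = F I.toNat b c := by
  unfold DG
  by_cases h : 1 ≤ c ∧ c ≤ min k I
  · rw [if_pos ⟨hb.1, hb.2, h.1, h.2⟩]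
  · rw [if_neg (fun h3 => h ⟨h3.2.2.1, h3.2.2.2⟩)]
    by_cases h0 : c ≤ 0
    · rw [F_zero_of_nonpos _ _ _ h0]
    · have hIc : ((I.toNat : Int)) < c := by omega
      rw [F_zero_of_gt _ _ _ hIc]

-- write-only sweep: each cell (j, t) written once with a value independent of the accumulator
lemma wfold (T : List Int) {M K : Nat} (g : Array (Array Int)) (hsh : Sh2 g M K)
    (j : Int) (v : Int → Int) (hj1 : 1 ≤ j) (hjM : j.toNat < M)
    (hTb : ∀ t ∈ T, 1 ≤ t ∧ t.toNat < K) :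
    Sh2 (T.foldl (fun nw t => dset nw j t (v t)) g) M K ∧
    ∀ x y : Int, dget (T.foldl (fun nw t => dset nw j t (v t)) g) x y
      = if x = j ∧ y ∈ T then v y else dget g x y := by
  induction T generalizing g with
  | nil => exact ⟨hsh, by simp⟩
  | cons a T ih =>
    have hab := hTb a List.mem_cons_self
    obtain ⟨ihs, ihp⟩ := ih (dset g j a (v a)) (sh2_dset hsh j a (v a))
      (fun t ht => hTb t (List.mem_cons_of_mem _ ht))
    refine ⟨by rw [List.foldl_cons]; exact ihs, ?_⟩
    intro x y
    rw [List.foldl_cons, ihp x y]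
    by_cases h1 : x = j ∧ y ∈ T
    · rw [if_pos h1, if_pos ⟨h1.1, List.mem_cons_of_mem _ h1.2⟩]
    · rw [if_neg h1, dget_dset hsh j a (v a) x y hj1 hjM hab.1 hab.2]
      by_cases h2 : x = j ∧ y = a
      · rw [if_pos h2, if_pos ⟨h2.1, by rw [h2.2]; exact List.mem_cons_self⟩, h2.2]
      · rw [if_neg h2, if_neg (by
          intro h
          rcases List.mem_cons.mp h.2 with h' | h'
          · exact h2 ⟨h.1, h'⟩
          · exact h1 ⟨h.1, h'⟩)]

-- accumulate sweep: prefix[t] += w t, each index once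
lemma prfold (T : List Int) (hT : T.Nodup) {S : Nat} (p : Array Int) (hp : p.size = S)
    (w : Int → Int) (hTb : ∀ t ∈ T, 0 ≤ t ∧ t.toNat < S) :
    (T.foldl (fun pr t => pset pr t (pget pr t + w t)) p).size = S ∧
    ∀ y : Int, pget (T.foldl (fun pr t => pset pr t (pget pr t + w t)) p) y
      = if y ∈ T then pget p y + w y else pget p y := by
  induction T generalizing p with
  | nil => exact ⟨hp, by simp⟩
  | cons a T ih =>
    obtain ⟨ha, hT'⟩ := List.nodup_cons.mp hT
    have hab := hTb a List.mem_cons_self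
    obtain ⟨ihs, ihp⟩ := ih hT' (pset p a (pget p a + w a)) (by rw [size_pset]; exact hp)
      (fun t ht => hTb t (List.mem_cons_of_mem _ ht))
    refine ⟨by rw [List.foldl_cons]; exact ihs, ?_⟩
    intro y
    rw [List.foldl_cons, ihp y]
    have hps := pget_pset p a (pget p a + w a)
    by_cases h1 : y ∈ T
    · have hya : y ≠ a := fun h => ha (h ▸ h1)
      rw [if_pos h1, if_pos (List.mem_cons_of_mem _ h1),
          hps y hab.1 (by rw [hp]; exact hab.2), if_neg hya]
    · rw [if_neg h1, hps y hab.1 (by rw [hp]; exact hab.2)]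
      by_cases h2 : y = a
      · subst h2
        rw [if_pos rfl, if_pos List.mem_cons_self]
      · rw [if_neg h2, if_neg (by
          intro h
          rcases List.mem_cons.mp h with h' | h'
          · exact h2 h'
          · exact h1 h')]

-- intermediate state of B's j sweep: new layer filled up to column J, prefix sums over 1..J
def NWB (m k I J : Int) : Int → Int → Int :=
  fun x y => if 1 ≤ x ∧ x ≤ J ∧ 1 ≤ y ∧ y ≤ min k (I+1) then F (I+1).toNat x y else 0
def PRB (m k I J : Int) : Int → Int :=
  fun y => if 0 ≤ y ∧ y ≤ min k (I+1)
    then ((PySem.List.pyRange 1 (J+1) 1).map (fun j0 => DG m k I j0 y)).sum else 0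

lemma rowB_aux (m k I : Int) (hk : 1 ≤ k) (hI : 1 ≤ I)
    (dp : Array (Array Int)) (hdp : ∀ x y : Int, dget dp x y = DG m k I x y) :
    ∀ J : Nat, (J:Int) ≤ m →
    (Sh2 ((PySem.List.pyRange 1 ((J:Int)+1) 1).foldl (bRow k (I+1) dp)
        (Array.replicate (m+1).toNat (Array.replicate (k+1).toNat 0),
         Array.replicate (min k (I+1) + 1).toNat 0)).1 (m+1).toNat (k+1).toNat
      ∧ ((PySem.List.pyRange 1 ((J:Int)+1) 1).foldl (bRow k (I+1) dp)
        (Array.replicate (m+1).toNat (Array.replicate (k+1).toNat 0),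
         Array.replicate (min k (I+1) + 1).toNat 0)).2.size = (min k (I+1) + 1).toNat)
    ∧ (∀ x y : Int, dget ((PySem.List.pyRange 1 ((J:Int)+1) 1).foldl (bRow k (I+1) dp)
        (Array.replicate (m+1).toNat (Array.replicate (k+1).toNat 0),
         Array.replicate (min k (I+1) + 1).toNat 0)).1 x y = NWB m k I (J:Int) x y)
    ∧ (∀ y : Int, pget ((PySem.List.pyRange 1 ((J:Int)+1) 1).foldl (bRow k (I+1) dp)
        (Array.replicate (m+1).toNat (Array.replicate (k+1).toNat 0),
         Array.replicate (min k (I+1) + 1).toNat 0)).2 y = PRB m k I (J:Int) y) := by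
  intro J
  induction J with
  | zero =>
    intro _
    rw [PySem.List.pyRange_one_eq_nil (by norm_num), List.foldl_nil]
    refine ⟨⟨sh2_rep _ _, by simp⟩, ?_, ?_⟩
    · intro x y
      show dget (Array.replicate (m+1).toNat (Array.replicate (k+1).toNat 0)) x y
        = NWB m k I ((0:Nat):Int) x y
      unfold NWB
      rw [if_neg (by push_cast; omega), dget_rep]
    · intro y
      show pget (Array.replicate (min k (I+1) + 1).toNat 0) y = PRB m k I ((0:Nat):Int) y
      unfold PRB
      push_cast
      rw [PySem.List.pyRange_one_eq_nil (by norm_num), pget_rep]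
      split_ifs <;> simp
  | succ J ih =>
    intro hJm
    have hJ : (J:Int) ≤ m := by push_cast at hJm ⊢; omega
    have hJm' : (J:Int)+1 ≤ m := by push_cast at hJm; omega
    obtain ⟨⟨shn, hpz⟩, ihn, ihp⟩ := ih hJ
    push_cast
    rw [show ((J:Int)+1+1) = ((J:Int)+1)+1 from rfl,
        PySem.List.pyRange_one_succ_right (by omega), List.foldl_append,
        List.foldl_cons, List.foldl_nil]
    generalize hG : (PySem.List.pyRange 1 ((J:Int)+1) 1).foldl (bRow k (I+1) dp)
        (Array.replicate (m+1).toNat (Array.replicate (k+1).toNat 0),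
         Array.replicate (min k (I+1) + 1).toNat 0) = P at shn hpz ihn ihp ⊢
    unfold bRow
    have hTw : ∀ t ∈ PySem.List.pyRange 1 (min k (I+1) + 1) 1,
        1 ≤ t ∧ t.toNat < (k+1).toNat := by
      intro t ht
      rw [PySem.List.mem_pyRange_one] at ht
      exact ⟨by omega, by omega⟩
    obtain ⟨ws, wp⟩ := wfold (PySem.List.pyRange 1 (min k (I+1) + 1) 1) P.1 shn
      ((J:Int)+1) (fun t => dget dp ((J:Int)+1) t * ((J:Int)+1) + pget P.2 (t-1))
      (by omega) (by omega) hTw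
    have hTp : ∀ t ∈ PySem.List.pyRange 0 (min k (I+1) + 1) 1,
        0 ≤ t ∧ t.toNat < (min k (I+1) + 1).toNat := by
      intro t ht
      rw [PySem.List.mem_pyRange_one] at ht
      exact ⟨by omega, by omega⟩
    obtain ⟨ps, pp⟩ := prfold (PySem.List.pyRange 0 (min k (I+1) + 1) 1)
      (PySem.List.nodup_pyRange_one _ _) P.2 hpz
      (fun t => dget dp ((J:Int)+1) t) hTp
    refine ⟨⟨ws, ps⟩, ?_, ?_⟩
    · intro x y
      rw [wp x y]
      by_cases hmem : x = (J:Int)+1 ∧ y ∈ PySem.List.pyRange 1 (min k (I+1) + 1) 1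
      · rw [if_pos hmem]
        obtain ⟨hx, hy⟩ := hmem
        rw [PySem.List.mem_pyRange_one] at hy
        rw [hdp, ihp]
        have hDG1 : DG m k I ((J:Int)+1) y = F I.toNat ((J:Int)+1) y :=
          DG_eq_F m k I hI _ _ ⟨by omega, hJm'⟩ ⟨by omega, by omega⟩
        have hsum : ((PySem.List.pyRange 1 ((J:Int)+1) 1).map (fun j0 => DG m k I j0 (y-1))).sum
            = ((PySem.List.pyRange 1 ((J:Int)+1) 1).map (fun j0 => F I.toNat j0 (y-1))).sum := by
          refine congrArg List.sum (List.map_congr_left ?_)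
          intro j0 hj0
          rw [PySem.List.mem_pyRange_one] at hj0
          exact DG_eq_F m k I hI _ _ ⟨by omega, by omega⟩ ⟨by omega, by omega⟩
        unfold NWB PRB
        rw [if_pos (by omega), if_pos (by omega), hDG1, hsum, hx,
            show (I+1).toNat = I.toNat + 1 by omega,
            F_rec I.toNat ((J:Int)+1) y (by omega) (by omega) (by omega)]
        ring
      · rw [if_neg hmem, ihn]
        simp only [PySem.List.mem_pyRange_one] at hmem
        unfold NWB
        by_cases h2 : 1 ≤ x ∧ x ≤ (J:Int) ∧ 1 ≤ y ∧ y ≤ min k (I+1)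
        · rw [if_pos h2, if_pos (by omega)]
        · rw [if_neg h2, if_neg (by omega)]
    · intro y
      rw [pp y]
      by_cases hmem : y ∈ PySem.List.pyRange 0 (min k (I+1) + 1) 1
      · rw [if_pos hmem]
        rw [PySem.List.mem_pyRange_one] at hmem
        rw [ihp, hdp]
        unfold PRB
        rw [if_pos (by omega), if_pos (by omega),
            PySem.List.pyRange_one_succ_right (show (1:Int) ≤ (J:Int)+1 by omega),
            List.map_append, List.sum_append]
        simp
      · rw [if_neg hmem, ihp]
        rw [PySem.List.mem_pyRange_one] at hmem
        unfold PRB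
        rw [if_neg (by omega), if_neg (by omega)]

lemma rowB (m k I : Int) (hk : 1 ≤ k) (hI : 1 ≤ I) (hm : 1 ≤ m)
    (dp : Array (Array Int)) (hdp : ∀ x y : Int, dget dp x y = DG m k I x y)
    (x y : Int) :
    dget (bStep m k dp (I+1)) x y = DG m k (I+1) x y := by
  unfold bStep
  have hmt : ((m.toNat : Int)) = m := by omega
  have h := (rowB_aux m k I hk hI dp hdp m.toNat (by omega)).2.1
  rw [hmt] at h
  rw [h]
  unfold NWB DG
  rfl

lemma ifoldB (m k : Int) (hk : 1 ≤ k) (hm : 1 ≤ m)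
    (S : Array (Array Int)) (hS : ∀ x y : Int, dget S x y = DG m k 1 x y) :
    ∀ N : Nat, ∀ x y : Int,
    dget ((PySem.List.pyRange 2 (2+(N:Int)) 1).foldl (bStep m k) S) x y
      = DG m k (1+(N:Int)) x y := by
  intro N
  induction N with
  | zero =>
    intro x y
    rw [PySem.List.pyRange_one_eq_nil (by norm_num), List.foldl_nil, hS]
    norm_num
  | succ N ih =>
    intro x y
    push_cast
    rw [show ((2:Int)+((N:Int)+1)) = (2+(N:Int))+1 by ring,
        PySem.List.pyRange_one_succ_right (by omega), List.foldl_append,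
        List.foldl_cons, List.foldl_nil]
    have ihS := ih
    generalize hG : (PySem.List.pyRange 2 (2+(N:Int)) 1).foldl (bStep m k) S = S' at ihS ⊢
    rw [show ((2:Int)+(N:Int)) = (1+(N:Int))+1 by ring,
        rowB m k (1+(N:Int)) hk (by omega) hm S' (fun x y => ihS x y) x y,
        show ((1:Int)+(N:Int))+1 = 1+((N:Int)+1) by ring]

lemma phase1B (L : List Int) {M K : Nat} (dp0 : Array (Array Int)) (hsh : Sh2 dp0 M K)
    (hK : 1 < K) (hL : ∀ i ∈ L, 1 ≤ i ∧ i.toNat < M) :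
    ∀ x y : Int, dget (L.foldl (fun dp j => dset dp j 1 1) dp0) x y
      = if x ∈ L ∧ y = 1 then 1 else dget dp0 x y := by
  induction L generalizing dp0 with
  | nil => simp
  | cons a L ih =>
    have ha := hL a List.mem_cons_self
    have ihp := ih (dset dp0 a 1 1) (sh2_dset hsh a 1 1)
      (fun i hi => hL i (List.mem_cons_of_mem _ hi))
    intro x y
    rw [List.foldl_cons, ihp x y,
        dget_dset hsh a 1 1 x y ha.1 ha.2 (le_refl 1) (by omega)]
    simp only [List.mem_cons]
    split_ifs <;> first | rfl | tauto

lemma B_main (n m k : Int) (hn : 1 ≤ n) (hm : 1 ≤ m) (hk : 1 ≤ k) (hkn : k ≤ n) :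
    numOfArrays1_alt n m k
      = PySem.Int.mod (((PySem.List.pyRange 1 (m+1) 1).map (fun j => F n.toNat j k)).sum)
          (10^9+7) := by
  unfold numOfArrays1_alt
  rw [if_neg (by omega)]
  have hdp1 : ∀ x y : Int,
      dget ((PySem.List.pyRange 1 (m+1) 1).foldl (fun dp j => dset dp j 1 1)
        (Array.replicate (m+1).toNat (Array.replicate (k+1).toNat 0))) x y
        = DG m k 1 x y := by
    intro x y
    rw [phase1B (PySem.List.pyRange 1 (m+1) 1) (M := (m+1).toNat) (K := (k+1).toNat)
      _ (sh2_rep _ _) (by omega)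
      (by
        intro i hi
        rw [PySem.List.mem_pyRange_one] at hi
        exact ⟨hi.1, by omega⟩) x y]
    unfold DG
    by_cases h : x ∈ PySem.List.pyRange 1 (m+1) 1 ∧ y = 1
    · obtain ⟨hx, rfl⟩ := h
      rw [PySem.List.mem_pyRange_one] at hx
      rw [if_pos ⟨PySem.List.mem_pyRange_one.mpr hx, rfl⟩, if_pos (by omega)]
      simp [F]
    · have h' := h
      simp only [PySem.List.mem_pyRange_one] at h'
      rw [if_neg h, if_neg (by omega), dget_rep]
  have h2 := ifoldB m k hk hm _ hdp1 (n-1).toNat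
  have hn' : ((n - 1).toNat : Int) = n - 1 := by omega
  rw [hn'] at h2
  simp only [show (2 + (n-1)) = n + 1 by ring, show (1 + (n-1)) = n by ring] at h2
  simp only [h2]
  congr 1
  refine congrArg List.sum (List.map_congr_left ?_)
  intro j hj
  rw [PySem.List.mem_pyRange_one] at hj
  exact DG_eq_F m k n hn j k ⟨hj.1, by omega⟩ ⟨by omega, le_refl k⟩

-- ===== VERDICT (by name: the statement is the Claim_ definition above) =====
theorem numOfArrays1_spec : Claim_equal_numOfArrays1 := by
  intro n m k _ hpre
  unfold Spec_numOfArrays1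
  by_cases hk0 : k = 0
  · subst hk0
    unfold numOfArrays1 numOfArrays1_alt
    rw [if_pos rfl, if_pos (Or.inl (le_refl 0))]
  by_cases hm0 : m ≤ 0
  · unfold numOfArrays1 numOfArrays1_alt
    rw [if_neg hk0, if_pos (Or.inr (Or.inl hm0))]
    rw [PySem.List.pyRange_one_eq_nil (show m+1 ≤ 1 by omega)]
    simp only [List.map_nil, List.sum_nil]
    rw [PySem.Int.mod_eq_emod_of_pos (by norm_num)]
    simp
  · have hn : 1 ≤ n := by
      rcases hpre with h | h | h
      · exact absurd h hk0
      · exact absurd h hm0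
      · exact h.1
    have hk : 1 ≤ k := by
      rcases hpre with h | h | h
      · exact absurd h hk0
      · exact absurd h hm0
      · exact h.2
    by_cases hkn : n < k
    · rw [A_main n m k hn (by omega) hk]
      have hz : ∀ j ∈ PySem.List.pyRange 1 (m+1) 1, F n.toNat j k = (fun _ => (0:Int)) j :=
        fun j _ => F_zero_of_gt _ _ _ (by omega)
      rw [List.map_congr_left hz]
      unfold numOfArrays1_alt
      rw [if_pos (Or.inr (Or.inr (Or.inr hkn)))]
      simp only [List.map_const', List.sum_replicate, smul_zero]
      rw [PySem.Int.mod_eq_emod_of_pos (by norm_num)]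
      simp
    · rw [A_main n m k hn (by omega) hk, B_main n m k hn (by omega) hk (by omega)]
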